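-- pv_equiv track=rewrite | github.com/ArthurDetomi/Maratona_Treino | spring-2025/efficient-algorithms/ways_example.py | count_ways_fast
-- ===== SOURCE A (Python) =====
-- def count_ways_fast(bits):
--   n = len(bits)
--   result = 0
--   zeros = 0
--   for i in range(n):
--     if bits[i] == '0':
--       zeros += 1
--     if bits[i] == '1':
--       result += zeros
--   return result
-- ===== SOURCE B (Python) =====
-- def count_ways_fast(bits):
--   ones_remaining = 0
--   for c in bits:
--     if c == '1':
--       ones_remaining += 1
--   result = 0
--   for c in bits:
--     if c == '0':
--       result += ones_remaining
--     elif c == '1':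
--       ones_remaining -= 1
--   return result
-- ===== Notes on version B (the rewrite author's own statement) =====
-- stated objective: alternative
-- what changed: B precomputes the total number of '1' characters, then sums for each '0' the count of ones remaining to its right (decrementing at each '1'), instead of A's incrementing zeros-so-far counter added at each '1'.
import Mathlib
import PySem

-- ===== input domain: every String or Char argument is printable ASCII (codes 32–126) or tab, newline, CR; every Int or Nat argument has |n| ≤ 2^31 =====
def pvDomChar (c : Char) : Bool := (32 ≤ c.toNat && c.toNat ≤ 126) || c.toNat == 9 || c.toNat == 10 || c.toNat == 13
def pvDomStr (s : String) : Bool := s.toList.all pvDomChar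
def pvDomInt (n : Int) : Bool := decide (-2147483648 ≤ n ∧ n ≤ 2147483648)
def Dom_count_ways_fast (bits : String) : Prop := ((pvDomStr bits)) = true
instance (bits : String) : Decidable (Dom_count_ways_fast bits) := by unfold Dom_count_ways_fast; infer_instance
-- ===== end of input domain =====

-- B counts, for each '0', the ones remaining to its right (total ones precomputed, decremented at
-- each '1'), instead of A's zeros-so-far counter added at each '1'; same O(n) cost, alternative
-- decomposition.

-- ===== PORT A =====
-- A's loop over indices i with state (result, zeros); iterating the characters in order is the
-- same traversal (bits[i] for i in range(len(bits))).
def pvGoA : List Char → Int → Int → Int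
  | [], result, _ => result
  | c :: t, result, zeros =>
    let zeros' := if c = '0' then zeros + 1 else zeros
    let result' := if c = '1' then result + zeros' else result
    pvGoA t result' zeros'

def count_ways_fast (bits : String) : Int := pvGoA bits.toList 0 0

-- ===== PORT B =====
-- first loop of Source B: total count of '1' characters
def pvOnes : List Char → Int
  | [] => 0
  | c :: t => (if c = '1' then 1 else 0) + pvOnes t

-- second loop of Source B: state (result, ones_remaining)
def pvGoB : List Char → Int → Int → Int
  | [], result, _ => result
  | c :: t, result, k =>
    if c = '0' then pvGoB t (result + k) k
    else if c = '1' then pvGoB t result (k - 1)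
    else pvGoB t result k

def count_ways_fast_alt (bits : String) : Int := pvGoB bits.toList 0 (pvOnes bits.toList)

-- ===== PRECONDITION & SPEC =====
def Spec_count_ways_fast (bits : String) (out : Int) : Prop := out = count_ways_fast_alt bits
instance (bits : String) (out : Int) : Decidable (Spec_count_ways_fast bits out) := by unfold Spec_count_ways_fast; infer_instance

-- ===== CLAIM (what is proved, stated in full; the proofs are below) =====
def Claim_equal_count_ways_fast : Prop := ∀ (bits : String), Dom_count_ways_fast bits → Spec_count_ways_fast bits (count_ways_fast bits)

-- ===== LEMMAS AND PROOFS =====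

-- number of '0' characters
def pvZeros : List Char → Int
  | [] => 0
  | c :: t => (if c = '0' then 1 else 0) + pvZeros t

-- pairs (zero before one) within the list
def pvQ : List Char → Int
  | [] => 0
  | c :: t => (if c = '0' then pvOnes t else 0) + pvQ t

-- pairs (one before zero) within the list
def pvP : List Char → Int
  | [] => 0
  | c :: t => (if c = '1' then pvZeros t else 0) + pvP t

theorem pvGoA_eq : ∀ (l : List Char) (r z : Int),
    pvGoA l r z = r + z * pvOnes l + pvQ l := by
  intro l
  induction l with
  | nil => intro r z; simp [pvGoA, pvOnes, pvQ]
  | cons c t ih =>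
    intro r z
    by_cases h0 : c = '0' <;> by_cases h1 : c = '1' <;>
      simp [pvGoA, pvOnes, pvQ, h0, h1, ih] <;> ring
-- Q counts zero-before-one from the zero side of the suffix sums
theorem pvGoB_eq : ∀ (l : List Char) (r k : Int),
    pvGoB l r k = r + k * pvZeros l - pvP l := by
  intro l
  induction l with
  | nil => intro r k; simp [pvGoB, pvZeros, pvP]
  | cons c t ih =>
    intro r k
    by_cases h0 : c = '0' <;> by_cases h1 : c = '1' <;>
      simp [pvGoB, pvZeros, pvP, h0, h1, ih] <;> ring

-- every (zero, one) pair is counted exactly once, on one side or the other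
theorem pvQ_add_pvP : ∀ (l : List Char),
    pvQ l + pvP l = pvZeros l * pvOnes l := by
  intro l
  induction l with
  | nil => simp [pvQ, pvP, pvZeros, pvOnes]
  | cons c t ih =>
    by_cases h0 : c = '0' <;> by_cases h1 : c = '1' <;>
      simp [pvQ, pvP, pvZeros, pvOnes, h0, h1] <;> linarith [ih]

-- ===== VERDICT (by name: the statement is the Claim_ definition above) =====
theorem count_ways_fast_spec : Claim_equal_count_ways_fast := by
  intro bits _
  show count_ways_fast bits = count_ways_fast_alt bits
  unfold count_ways_fast count_ways_fast_alt
  rw [pvGoA_eq, pvGoB_eq]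
  have := pvQ_add_pvP bits.toList
  linarith
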